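-- pv_equiv track=rewrite | github.com/rblancodiaz/nostromo | tools/ctusers/user_rewards_details_rq.py | _format_user_rewards_details
-- ===== SOURCE A (Python) =====
-- from typing import Dict, Any, List, Optional
--
-- def _format_user_rewards_details(users: List[Dict[str, Any]]) -> List[Dict[str, Any]]:
--     """Format user rewards details for readable output."""
--     formatted_users = []
--
--     for user in users:
--         formatted_user = {
--             "contact_information": {
--                 "email": user.get("Email"),
--                 "phone": user.get("Phone"),
--                 "mobile": user.get("Mobile"),
--                 "fax": user.get("Fax")
--             },
--             "personal_information": {
--                 "title": user.get("Title"),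
--                 "first_name": user.get("Firstname"),
--                 "last_name": user.get("Surname"),
--                 "passport": user.get("Passport"),
--                 "date_of_birth": user.get("DateOfBirthday")
--             },
--             "address_information": {
--                 "address": user.get("Address"),
--                 "postal_code": user.get("Zip"),
--                 "city": user.get("City"),
--                 "country": user.get("Country")
--             },
--             "subscription_information": {
--                 "date_created": user.get("DateCreated"),
--                 "last_update": user.get("LastUpdate")
--             }
--         }
--
--         formatted_users.append(formatted_user)
--
--     return formatted_users
-- ===== SOURCE B (Python) =====
-- from typing import Dict, Any, List
--
-- # Inverted index: source key -> (section, output field)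
-- _REV = {
--     "Email": ("contact_information", "email"),
--     "Phone": ("contact_information", "phone"),
--     "Mobile": ("contact_information", "mobile"),
--     "Fax": ("contact_information", "fax"),
--     "Title": ("personal_information", "title"),
--     "Firstname": ("personal_information", "first_name"),
--     "Surname": ("personal_information", "last_name"),
--     "Passport": ("personal_information", "passport"),
--     "DateOfBirthday": ("personal_information", "date_of_birth"),
--     "Address": ("address_information", "address"),
--     "Zip": ("address_information", "postal_code"),
--     "City": ("address_information", "city"),
--     "Country": ("address_information", "country"),
--     "DateCreated": ("subscription_information", "date_created"),
--     "LastUpdate": ("subscription_information", "last_update"),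
-- }
--
-- # Output layout: section -> ordered output fields
-- _LAYOUT = [
--     ("contact_information", ["email", "phone", "mobile", "fax"]),
--     ("personal_information", ["title", "first_name", "last_name", "passport", "date_of_birth"]),
--     ("address_information", ["address", "postal_code", "city", "country"]),
--     ("subscription_information", ["date_created", "last_update"]),
-- ]
--
--
-- def _format_one(user):
--     # Route the user's own entries into output slots via the inverted index,
--     # then read the layout off the filled slots (missing slots -> None).
--     slots = {}
--     for key, value in user.items():
--         target = _REV.get(key)
--         if target is not None:
--             slots.setdefault(target, value)
--     return {sec: {f: slots.get((sec, f)) for f in fields} for sec, fields in _LAYOUT}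
--
--
-- def _format_user_rewards_details(users: List[Dict[str, Any]]) -> List[Dict[str, Any]]:
--     return [_format_one(u) for u in users]
-- ===== Notes on version B (the rewrite author's own statement) =====
-- stated objective: alternative
-- what changed: Instead of building each record with fifteen hardcoded .get lookups, B iterates once over each user's own entries and routes them through an inverted index (source key -> (section, field)) into a slots dict, then reads the declared output layout off the slots (missing slots become None).
import Mathlib
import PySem

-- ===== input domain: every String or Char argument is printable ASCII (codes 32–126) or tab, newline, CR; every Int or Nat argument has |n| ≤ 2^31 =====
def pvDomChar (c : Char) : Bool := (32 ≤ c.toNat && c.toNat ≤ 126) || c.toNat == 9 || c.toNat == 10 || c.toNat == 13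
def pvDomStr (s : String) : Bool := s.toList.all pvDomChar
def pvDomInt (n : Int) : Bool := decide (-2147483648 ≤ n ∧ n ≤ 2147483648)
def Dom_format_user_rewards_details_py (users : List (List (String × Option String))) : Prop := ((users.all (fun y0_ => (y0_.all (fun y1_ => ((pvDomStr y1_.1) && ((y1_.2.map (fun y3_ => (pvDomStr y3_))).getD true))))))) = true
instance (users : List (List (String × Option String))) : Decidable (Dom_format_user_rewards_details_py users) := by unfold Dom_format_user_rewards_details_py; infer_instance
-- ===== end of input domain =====

-- B routes each user's own entries through an inverted index (source key -> (section, field)) into a slots dict and reads the output layout off it, instead of A's fifteen hardcoded lookups; alternative decomposition, same cost.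


-- ===== PORT A =====
-- user.get(k): first-match lookup in the association list; missing key -> none (Python None)
def pvUserGet (user : List (String × Option String)) (k : String) : Option String :=
  ((PySem.Dict.mk user).get? k).getD none

def format_user_rewards_details_py (users : List (List (String × Option String))) : List (List (String × List (String × Option String))) :=
  users.foldl (fun formatted_users user =>
    formatted_users ++ [[
      ("contact_information", [
        ("email", pvUserGet user "Email"),
        ("phone", pvUserGet user "Phone"),
        ("mobile", pvUserGet user "Mobile"),
        ("fax", pvUserGet user "Fax")]),
      ("personal_information", [
        ("title", pvUserGet user "Title"),
        ("first_name", pvUserGet user "Firstname"),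
        ("last_name", pvUserGet user "Surname"),
        ("passport", pvUserGet user "Passport"),
        ("date_of_birth", pvUserGet user "DateOfBirthday")]),
      ("address_information", [
        ("address", pvUserGet user "Address"),
        ("postal_code", pvUserGet user "Zip"),
        ("city", pvUserGet user "City"),
        ("country", pvUserGet user "Country")]),
      ("subscription_information", [
        ("date_created", pvUserGet user "DateCreated"),
        ("last_update", pvUserGet user "LastUpdate")])]]) []

-- ===== PORT B =====
-- _REV: inverted index, source key -> (section, output field)
def pvRevList : List (String × (String × String)) :=
  [("Email", ("contact_information", "email")),
   ("Phone", ("contact_information", "phone")),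
   ("Mobile", ("contact_information", "mobile")),
   ("Fax", ("contact_information", "fax")),
   ("Title", ("personal_information", "title")),
   ("Firstname", ("personal_information", "first_name")),
   ("Surname", ("personal_information", "last_name")),
   ("Passport", ("personal_information", "passport")),
   ("DateOfBirthday", ("personal_information", "date_of_birth")),
   ("Address", ("address_information", "address")),
   ("Zip", ("address_information", "postal_code")),
   ("City", ("address_information", "city")),
   ("Country", ("address_information", "country")),
   ("DateCreated", ("subscription_information", "date_created")),
   ("LastUpdate", ("subscription_information", "last_update"))]

def pvRev : PySem.Dict String (String × String) := PySem.Dict.mk pvRevList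

-- _LAYOUT: section -> ordered output fields
def pvLayout : List (String × List String) :=
  [("contact_information", ["email", "phone", "mobile", "fax"]),
   ("personal_information", ["title", "first_name", "last_name", "passport", "date_of_birth"]),
   ("address_information", ["address", "postal_code", "city", "country"]),
   ("subscription_information", ["date_created", "last_update"])]

-- _format_one: route the user's entries into slots via _REV, then read the layout off the slots
def pvFormatOne (user : List (String × Option String)) : List (String × List (String × Option String)) :=
  let slots := user.foldl (fun d kv =>
    match pvRev.get? kv.1 with
    | some target => d.setdefault target kv.2
    | none => d) PySem.Dict.empty
  pvLayout.map (fun sf => (sf.1, sf.2.map (fun f => (f, (slots.get? (sf.1, f)).getD none))))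

def format_user_rewards_details_py_alt (users : List (List (String × Option String))) : List (List (String × List (String × Option String))) :=
  users.map pvFormatOne

-- ===== PRECONDITION & SPEC =====
def Spec_format_user_rewards_details_py (users : List (List (String × Option String))) (out : List (List (String × List (String × Option String)))) : Prop := out = format_user_rewards_details_py_alt users
instance (users : List (List (String × Option String))) (out : List (List (String × List (String × Option String)))) : Decidable (Spec_format_user_rewards_details_py users out) := by unfold Spec_format_user_rewards_details_py; infer_instance

-- ===== CLAIM (what is proved, stated in full; the proofs are below) =====
def Claim_equal_format_user_rewards_details_py : Prop := ∀ (users : List (List (String × Option String))), Dom_format_user_rewards_details_py users → Spec_format_user_rewards_details_py users (format_user_rewards_details_py users)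

-- ===== LEMMAS AND PROOFS =====

-- the loop body of B's slots fold
def pvStep (d : PySem.Dict (String × String) (Option String)) (kv : String × Option String) : PySem.Dict (String × String) (Option String) :=
  match pvRev.get? kv.1 with
  | some target => d.setdefault target kv.2
  | none => d

-- a key looked up successfully in pvRev yields a pair of pvRevList
theorem pvRev_mem (k : String) (t : String × String) (h : pvRev.get? k = some t) : (k, t) ∈ pvRevList :=
  PySem.Dict.mem_items_of_get?_eq_some pvRev h

-- setdefault at another key does not change get?
theorem get?_setdefault_of_ne {κ ν : Type} [BEq κ] [LawfulBEq κ] (d : PySem.Dict κ ν) (k k' : κ) (v : ν) (h : k' ≠ k) :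
    (d.setdefault k v).get? k' = d.get? k' := by
  by_cases hc : d.contains k = true
  · rw [PySem.Dict.setdefault_of_contains d v hc]
  · rw [PySem.Dict.setdefault_of_not_contains d v (by simpa using hc)]
    exact PySem.Dict.get?_insert_of_ne d v h

-- the slots fold looks up target t exactly as a first-match lookup of its (unique) source key k
theorem slots_get (user : List (String × Option String)) (d : PySem.Dict (String × String) (Option String))
    (k : String) (t : String × String) (hk : pvRev.get? k = some t)
    (hinj : ∀ k', pvRev.get? k' = some t → k' = k) :
    (user.foldl pvStep d).get? t = (d.get? t).or ((PySem.Dict.mk user).get? k) := by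
  induction user generalizing d with
  | nil => simp [PySem.Dict.get?]
  | cons kv rest ih =>
    simp only [List.foldl_cons]
    rw [PySem.Dict.get?_mk_cons]
    by_cases hfire : pvRev.get? kv.1 = some t
    · have hkeq : kv.1 = k := hinj _ hfire
      have hstep : pvStep d kv = d.setdefault t kv.2 := by
        simp [pvStep, hfire]
      rw [hstep, ih _]
      rw [PySem.Dict.get?_setdefault_self]
      have : (kv.1 == k) = true := by simp [hkeq]
      rw [this]
      simp only [if_true]
      cases hd : d.get? t <;> simp
    · have hne : kv.1 ≠ k := by
        intro he; exact hfire (he ▸ hk)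
      have : (kv.1 == k) = false := by simp [hne]
      rw [this]
      simp only [Bool.false_eq_true, if_false]
      cases hr : pvRev.get? kv.1 with
      | none => rw [show pvStep d kv = d by simp [pvStep, hr]]; exact ih d
      | some t' =>
        have ht' : t' ≠ t := by
          intro he; exact hfire (he ▸ hr)
        rw [show pvStep d kv = d.setdefault t' kv.2 by simp [pvStep, hr]]
        rw [ih _]
        rw [get?_setdefault_of_ne d t' t kv.2 ht'.symm]

-- per-field agreement: B's slot read equals A's user.get
theorem field_eq (user : List (String × Option String)) (k : String) (t : String × String)
    (hk : pvRev.get? k = some t) (hinj : ∀ k', pvRev.get? k' = some t → k' = k) :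
    ((user.foldl pvStep PySem.Dict.empty).get? t).getD none = pvUserGet user k := by
  rw [slots_get user PySem.Dict.empty k t hk hinj]
  simp [PySem.Dict.get?_empty, pvUserGet]

-- injectivity of the inverted index at a concrete target
theorem rev_inj (k : String) (t : String × String) (k' : String) (h : pvRev.get? k' = some t)
    (huniq : ∀ p ∈ pvRevList, p.2 = t → p.1 = k) : k' = k := by
  have hm := pvRev_mem k' t h
  exact huniq (k', t) hm rfl

-- per-user agreement: B's routed record equals A's literal record
theorem record_eq (user : List (String × Option String)) :
    pvFormatOne user =
      [("contact_information", [
          ("email", pvUserGet user "Email"),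
          ("phone", pvUserGet user "Phone"),
          ("mobile", pvUserGet user "Mobile"),
          ("fax", pvUserGet user "Fax")]),
       ("personal_information", [
          ("title", pvUserGet user "Title"),
          ("first_name", pvUserGet user "Firstname"),
          ("last_name", pvUserGet user "Surname"),
          ("passport", pvUserGet user "Passport"),
          ("date_of_birth", pvUserGet user "DateOfBirthday")]),
       ("address_information", [
          ("address", pvUserGet user "Address"),
          ("postal_code", pvUserGet user "Zip"),
          ("city", pvUserGet user "City"),
          ("country", pvUserGet user "Country")]),
       ("subscription_information", [
          ("date_created", pvUserGet user "DateCreated"),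
          ("last_update", pvUserGet user "LastUpdate")])] := by
  have h0 : pvFormatOne user = pvLayout.map (fun sf => (sf.1, sf.2.map (fun f =>
      (f, ((user.foldl pvStep PySem.Dict.empty).get? (sf.1, f)).getD none)))) := rfl
  rw [h0]
  simp only [pvLayout, List.map_cons, List.map_nil]
  have F : ∀ (k : String) (t : String × String), pvRev.get? k = some t →
      (∀ p ∈ pvRevList, p.2 = t → p.1 = k) →
      ((user.foldl pvStep PySem.Dict.empty).get? t).getD none = pvUserGet user k := by
    intro k t hk huniq
    exact field_eq user k t hk (fun k' h => rev_inj k t k' h huniq)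
  rw [F "Email" _ (by decide) (by decide), F "Phone" _ (by decide) (by decide),
      F "Mobile" _ (by decide) (by decide), F "Fax" _ (by decide) (by decide),
      F "Title" _ (by decide) (by decide), F "Firstname" _ (by decide) (by decide),
      F "Surname" _ (by decide) (by decide), F "Passport" _ (by decide) (by decide),
      F "DateOfBirthday" _ (by decide) (by decide), F "Address" _ (by decide) (by decide),
      F "Zip" _ (by decide) (by decide), F "City" _ (by decide) (by decide),
      F "Country" _ (by decide) (by decide), F "DateCreated" _ (by decide) (by decide),
      F "LastUpdate" _ (by decide) (by decide)]

-- ===== VERDICT (by name: the statement is the Claim_ definition above) =====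
theorem format_user_rewards_details_py_spec : Claim_equal_format_user_rewards_details_py := by
  intro users _
  unfold Spec_format_user_rewards_details_py
  rw [format_user_rewards_details_py, PySem.List.foldl_append_singleton_eq_map]
  unfold format_user_rewards_details_py_alt
  exact List.map_congr_left (fun user _ => (record_eq user).symm)
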